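-- pv_equiv track=rewrite | github.com/iCarrrot/IZP-glosowanie | izp/polls/views.py | reformat_code
-- ===== SOURCE A (Python) =====
-- def reformat_code(code):
--     if len(code) <= 4 or "-" not in code:
--         return code
--
--     newCode = ""
--     for l, c in enumerate(code):
--         if (l + 1) % 5 == 0:
--             if l + 1 == len(code) or code[l] != "-":
--                 return ''
--         elif code[l] == "-":
--             return ''
--         else:
--             newCode += c
--     return newCode
-- ===== SOURCE B (Python) =====
-- def reformat_code(code):
--     if len(code) <= 4 or "-" not in code:
--         return code
--     groups = code.split("-")
--     if all(len(g) == 4 for g in groups[:-1]) and 1 <= len(groups[-1]) <= 4: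
--         return "".join(groups)
--     return ""
-- ===== Notes on version B (the rewrite author's own statement) =====
-- stated objective: idiomatic
-- what changed: Replaces the positional (l+1)%5 character-by-character scan with a split-on-dash pass: validate group lengths (all 4 except a last of 1-4) and join the groups.
import Mathlib
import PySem

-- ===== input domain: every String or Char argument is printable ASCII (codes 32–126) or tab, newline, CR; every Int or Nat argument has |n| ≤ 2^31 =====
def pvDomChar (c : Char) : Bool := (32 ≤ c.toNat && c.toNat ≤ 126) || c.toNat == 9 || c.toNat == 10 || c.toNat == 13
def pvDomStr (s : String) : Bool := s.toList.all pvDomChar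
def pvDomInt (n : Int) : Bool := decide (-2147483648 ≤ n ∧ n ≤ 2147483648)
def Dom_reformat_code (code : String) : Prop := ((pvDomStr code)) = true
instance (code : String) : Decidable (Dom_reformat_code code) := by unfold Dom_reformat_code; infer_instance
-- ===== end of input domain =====

-- B replaces A's positional (l+1)%5 character scan by an idiomatic split-on-dash pass
-- (validate group lengths, join the groups); same cost, different decomposition.

-- ===== PORT A =====
-- the for-loop over enumerate(code) with its three early returns; n = len(code),
-- l the running index, acc the accumulated newCode (as a char list)
def reformatLoopA (n : Nat) : List Char → Nat → List Char → String
  | [], _, acc => String.mk acc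
  | c :: rest, l, acc =>
    if (l + 1) % 5 == 0 then
      if l + 1 == n || c != '-' then ""
      else reformatLoopA n rest (l + 1) acc
    else if c == '-' then ""
    else reformatLoopA n rest (l + 1) (acc ++ [c])

def reformat_code (code : String) : String :=
  if decide (code.toList.length ≤ 4) || !PySem.Str.isIn "-" code then code
  else reformatLoopA code.toList.length code.toList 0 []

-- ===== PORT B =====
def reformat_code_alt (code : String) : String :=
  if decide (code.toList.length ≤ 4) || !PySem.Str.isIn "-" code then code
  else
    if (code.toList.splitOn '-').dropLast.all (fun g => g.length == 4)
        && (decide (1 ≤ ((code.toList.splitOn '-').getLastD []).length)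
            && decide (((code.toList.splitOn '-').getLastD []).length ≤ 4))
    then String.mk (code.toList.splitOn '-').flatten
    else ""

-- ===== PRECONDITION & SPEC =====
def Spec_reformat_code (code : String) (out : String) : Prop := out = reformat_code_alt code
instance (code : String) (out : String) : Decidable (Spec_reformat_code code out) := by unfold Spec_reformat_code; infer_instance

-- ===== CLAIM (what is proved, stated in full; the proofs are below) =====
def Claim_equal_reformat_code : Prop := ∀ (code : String), Dom_reformat_code code → Spec_reformat_code code (reformat_code code)

-- ===== LEMMAS AND PROOFS =====

-- proof-only characterisation of A's scan: phase p = l % 5; none models "return ''"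
def scanA : List Char → Nat → Option (List Char)
  | [], _ => some []
  | c :: rest, p =>
    if p = 4 then
      if rest = [] ∨ c ≠ '-' then none
      else scanA rest 0
    else if c = '-' then none
    else (scanA rest (p + 1)).map (c :: ·)

-- proof-only group check: all groups length 4, last group length 1..4
def checkG : List (List Char) → Bool
  | [] => false
  | [g] => decide (1 ≤ g.length) && decide (g.length ≤ 4)
  | g :: gs => (g.length == 4) && checkG gs

theorem loopA_eq_scanA (cs : List Char) : ∀ (l : Nat) (acc : List Char),
    reformatLoopA (l + cs.length) cs l acc =
      match scanA cs (l % 5) with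
      | none => ""
      | some out => String.mk (acc ++ out) := by
  induction cs with
  | nil => intro l acc; simp [reformatLoopA, scanA]
  | cons c rest ih =>
    intro l acc
    by_cases h5 : l % 5 = 4
    · have h5' : (l + 1) % 5 = 0 := by omega
      by_cases hre : rest = []
      · subst hre
        simp [reformatLoopA, scanA, h5, h5']
      · have hlen : l + 1 ≠ l + (c :: rest).length := by
          simp [List.length_cons]
          omega
        by_cases hc : c = '-'
        · subst hc
          have : l + (rest.length + 1) = (l + 1) + rest.length := by omega
          simp [reformatLoopA, scanA, h5, h5', hre, this, ih (l + 1) acc]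
        · simp [reformatLoopA, scanA, h5, h5', hc, hre]
    · have h5' : (l + 1) % 5 ≠ 0 := by omega
      have h51 : (l + 1) % 5 = l % 5 + 1 := by omega
      by_cases hc : c = '-'
      · subst hc; simp [reformatLoopA, scanA, h5, h5']
      · have : l + (c :: rest).length = (l + 1) + rest.length := by
          simp [List.length_cons]; omega
        rw [reformatLoopA, this]
        simp only [h5', if_neg, beq_iff_eq]
        rw [if_neg (by simpa using h5'), if_neg (by simpa using hc)]
        rw [ih (l + 1) (acc ++ [c])]
        rw [scanA]
        rw [if_neg h5, if_neg hc, h51]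
        cases scanA rest (l % 5 + 1) with
        | none => rfl
        | some out => simp

theorem scanA_group (g : List Char) (hg : '-' ∉ g) :
    ∀ (p : Nat) (rest : List Char),
    scanA (g ++ '-' :: rest) p =
      if p + g.length = 4 ∧ rest ≠ [] then (scanA rest 0).map (g ++ ·) else none := by
  induction g with
  | nil =>
    intro p rest
    by_cases h4 : p = 4
    · subst h4
      by_cases hre : rest = [] <;> simp [scanA, hre]
    · simp [scanA, h4]
  | cons c g' ih =>
    intro p rest
    have hc : c ≠ '-' := fun h => hg (h ▸ List.mem_cons_self ..)
    have hg' : '-' ∉ g' := fun h => hg (List.mem_cons_of_mem _ h)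
    by_cases h4 : p = 4
    · subst h4
      have hno : ¬ (4 + (c :: g').length = 4 ∧ rest ≠ []) := by
        rintro ⟨h1, -⟩
        simp [List.length_cons] at h1
      simp [scanA, hc, hno]
    · rw [List.cons_append, scanA]
      rw [if_neg h4, if_neg hc, ih hg' (p + 1) rest]
      by_cases hcond : p + 1 + g'.length = 4 ∧ rest ≠ []
      · obtain ⟨hc1, hc2⟩ := hcond
        have hpos : p + (c :: g').length = 4 ∧ rest ≠ [] := ⟨by rw [List.length_cons]; omega, hc2⟩
        rw [if_pos ⟨hc1, hc2⟩, if_pos hpos]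
        cases scanA rest 0 <;> simp
      · have hno : ¬ (p + (c :: g').length = 4 ∧ rest ≠ []) := by
          rintro ⟨h1, h2⟩
          rw [List.length_cons] at h1
          exact hcond ⟨by omega, h2⟩
        rw [if_neg hcond, if_neg hno]
        simp

theorem scanA_last (g : List Char) (hg : '-' ∉ g) :
    ∀ (p : Nat), p ≤ 4 →
    scanA g p = if p + g.length ≤ 4 then some g else none := by
  induction g with
  | nil => intro p hp; simp [scanA]; omega
  | cons c g' ih =>
    intro p hp
    have hc : c ≠ '-' := fun h => hg (h ▸ List.mem_cons_self ..)
    have hg' : '-' ∉ g' := fun h => hg (List.mem_cons_of_mem _ h)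
    by_cases h4 : p = 4
    · subst h4
      simp [scanA, hc, List.length_cons]
    · rw [scanA, if_neg h4, if_neg hc, ih hg' (p + 1) (by omega)]
      by_cases hcond : p + 1 + g'.length ≤ 4
      · rw [if_pos hcond, if_pos (by simp [List.length_cons]; omega)]
        rfl
      · rw [if_neg hcond, if_neg (by simp [List.length_cons]; omega)]
        rfl

theorem scanA_groups (gs : List (List Char)) :
    ∀ (g : List Char), (∀ h ∈ g :: gs, '-' ∉ h) → gs ≠ [] →
    scanA (List.intercalate ['-'] (g :: gs)) 0 =
      if checkG (g :: gs) then some ((g :: gs).flatten) else none := by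
  induction gs with
  | nil => intro g _ hne; exact absurd rfl hne
  | cons h t ih =>
    intro g hfree _
    have hgfree : '-' ∉ g := hfree g (List.mem_cons_self ..)
    have hhfree : '-' ∉ h := hfree h (by simp)
    have hstep : List.intercalate ['-'] (g :: h :: t) =
        g ++ '-' :: List.intercalate ['-'] (h :: t) := by
      simp [List.intercalate, List.intersperse]
    rw [hstep, scanA_group g hgfree 0 _]
    cases t with
    | nil =>
      have hint : List.intercalate ['-'] [h] = h := by
        simp [List.intercalate, List.intersperse]
      rw [hint]
      by_cases hg4 : g.length = 4
      · by_cases hh : h = []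
        · subst hh
          rw [if_neg (by simp)]
          simp [checkG]
        · rw [if_pos ⟨by omega, hh⟩, scanA_last h hhfree 0 (by omega)]
          have hh1 : 0 < h.length := List.length_pos_of_ne_nil hh
          by_cases hh4 : h.length ≤ 4
          · rw [if_pos (by omega)]
            simp [checkG, hg4, hh4]
            omega
          · rw [if_neg (by omega)]
            simp [checkG, hh4]
      · rw [if_neg (by rintro ⟨h1, -⟩; omega)]
        simp [checkG, hg4]
    | cons h' t' =>
      have hne : List.intercalate ['-'] (h :: h' :: t') ≠ [] := by
        simp [List.intercalate, List.intersperse]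
      rw [ih h (fun x hx => hfree x (List.mem_cons_of_mem _ hx)) (by simp)]
      by_cases hg4 : g.length = 4
      · by_cases hck : checkG (h :: h' :: t') = true
        · rw [if_pos ⟨by omega, hne⟩, hck]
          simp only [checkG] at hck ⊢
          simp [hg4, hck]
        · rw [if_pos ⟨by omega, hne⟩]
          simp only [Bool.not_eq_true] at hck
          rw [hck]
          simp only [checkG] at hck ⊢
          simp [hck]
      · rw [if_neg (by rintro ⟨h1, -⟩; omega)]
        simp only [checkG]
        rw [if_neg (by simp [hg4])]

theorem splitOn_dash_free (cs : List Char) :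
    ∀ g ∈ cs.splitOn '-', '-' ∉ g := by
  induction cs with
  | nil =>
    intro g hmem
    simp [List.splitOn, List.splitOnP, List.splitOnP.go] at hmem
    simp [hmem]
  | cons c rest ih =>
    intro g hmem
    rw [show (c :: rest).splitOn '-' = List.splitOnP (· == '-') (c :: rest) from rfl,
        List.splitOnP_cons] at hmem
    by_cases hc : c = '-'
    · simp [hc] at hmem
      rcases hmem with h | h
      · simp [h]
      · exact ih g h
    · simp [hc] at hmem
      cases hsp : rest.splitOn '-' with
      | nil => exact absurd hsp (List.splitOnP_ne_nil _ rest)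
      | cons a as =>
        rw [show rest.splitOn '-' = List.splitOnP (· == '-') rest from rfl] at hsp
        rw [hsp] at hmem
        simp [List.modifyHead] at hmem
        rcases hmem with h | h
        · subst h
          intro hm
          rcases List.mem_cons.mp hm with h' | h'
          · exact hc h'.symm
          · exact ih a (by rw [show rest.splitOn '-' = List.splitOnP (· == '-') rest from rfl, hsp]; simp) h'
        · exact ih g (by rw [show rest.splitOn '-' = List.splitOnP (· == '-') rest from rfl, hsp]; simp [h])

theorem splitOn_len_ge_two (cs : List Char) (hd : '-' ∈ cs) :
    2 ≤ (cs.splitOn '-').length := by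
  induction cs with
  | nil => simp at hd
  | cons c rest ih =>
    rw [show (c :: rest).splitOn '-' = List.splitOnP (· == '-') (c :: rest) from rfl,
        List.splitOnP_cons]
    by_cases hc : c = '-'
    · simp [hc]
      have := List.splitOnP_ne_nil (· == '-') rest
      have : 1 ≤ (List.splitOnP (· == '-') rest).length :=
        List.length_pos_of_ne_nil this
      omega
    · have hd' : '-' ∈ rest := by
        rcases List.mem_cons.mp hd with h | h
        · exact absurd h.symm hc
        · exact h
      simp [hc]
      have := ih hd'
      rw [show rest.splitOn '-' = List.splitOnP (· == '-') rest from rfl] at this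
      cases hsp : List.splitOnP (· == '-') rest with
      | nil => exact absurd hsp (List.splitOnP_ne_nil _ rest)
      | cons a as =>
        rw [hsp] at this
        simp [List.modifyHead]
        simp at this
        omega

theorem checkG_eq_cond (groups : List (List Char)) (hne : groups ≠ []) :
    (groups.dropLast.all (fun g => g.length == 4)
      && (decide (1 ≤ (groups.getLastD []).length) && decide ((groups.getLastD []).length ≤ 4)))
    = checkG groups := by
  induction groups with
  | nil => exact absurd rfl hne
  | cons g gs ih =>
    cases gs with
    | nil => simp [checkG]
    | cons h t =>
      have := ih (by simp)
      simp only [List.dropLast_cons_of_ne_nil (by simp : h :: t ≠ ([] : List (List Char))),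
        List.all_cons, List.getLastD_cons] at *
      rw [show checkG (g :: h :: t) = ((g.length == 4) && checkG (h :: t)) from rfl]
      rw [← this]
      cases hgl : (g.length == 4) <;> simp

theorem reformat_code_eq (code : String) : reformat_code code = reformat_code_alt code := by
  unfold reformat_code reformat_code_alt
  by_cases hguard : (decide (code.toList.length ≤ 4) || !PySem.Str.isIn "-" code) = true
  · rw [if_pos hguard, if_pos hguard]
  · rw [if_neg hguard, if_neg hguard]
    have hin : PySem.Str.isIn "-" code = true := by
      cases h : PySem.Str.isIn "-" code
      · exact absurd (by rw [h]; simp) hguard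
      · rfl
    have hd : '-' ∈ code.toList := by
      rw [PySem.Str.isIn_eq] at hin
      have := (PySem.Chars.isIn_iff_infix _ _).mp hin
      rcases this with ⟨s, t, hst⟩
      rw [← hst]; simp
    set cs := code.toList with hcs
    have hlen2 : 2 ≤ (cs.splitOn '-').length := splitOn_len_ge_two cs hd
    obtain ⟨g, gs, hsp⟩ : ∃ g gs, cs.splitOn '-' = g :: gs := by
      cases h : cs.splitOn '-' with
      | nil => rw [h] at hlen2; simp at hlen2
      | cons a as => exact ⟨a, as, rfl⟩
    have hgs : gs ≠ [] := by
      rw [hsp] at hlen2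
      cases gs with
      | nil => simp at hlen2
      | cons _ _ => simp
    have hfree : ∀ h ∈ g :: gs, '-' ∉ h := by
      intro h hmem; exact splitOn_dash_free cs h (hsp ▸ hmem)
    have hint : List.intercalate ['-'] (g :: gs) = cs := by
      rw [← hsp]; exact List.intercalate_splitOn cs '-'
    have hA := loopA_eq_scanA cs 0 []
    rw [Nat.zero_add] at hA
    rw [hA]
    have hscan : scanA cs 0 = if checkG (g :: gs) then some ((g :: gs).flatten) else none := by
      rw [← hint]; exact scanA_groups gs g hfree hgs
    rw [show (0 : Nat) % 5 = 0 from rfl, hscan]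
    rw [hsp]
    have hcc := checkG_eq_cond (g :: gs) (by simp)
    rw [hcc]
    cases hck : checkG (g :: gs) <;> simp

-- ===== VERDICT (by name: the statement is the Claim_ definition above) =====
theorem reformat_code_spec : Claim_equal_reformat_code := by
  intro code _
  unfold Spec_reformat_code
  exact reformat_code_eq code
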